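-- pv_equiv track=rewrite | github.com/jirayuwat12/com-prog-1- | final exam/3-6.py | pattern2
-- ===== SOURCE A (Python) =====
-- def pattern2(N):
--     ret = []
--     for i in range(N):
--         ret.append([])
--         for j in range(N):
--             ret[i].append(0)
--     h = 1
--     for i in range(N):
--         for j in range(N):
--             if j < N-i:
--                 ret[j][i] = h
--                 h+=1
--     return ret
-- ===== SOURCE B (Python) =====
-- def pattern2(N):
--     # closed form: column i holds offset(i)+j+1 in rows j < N-i, else 0,
--     # where offset(i) = i*(2*N - i + 1)//2 = number of filled cells in columns < i
--     return [[(i * (2 * N - i + 1) // 2 + j + 1) if j < N - i else 0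
--              for i in range(N)]
--             for j in range(N)]
-- ===== Notes on version B (the rewrite author's own statement) =====
-- stated objective: simpler
-- what changed: Replaced the zero-init pass plus sequential counter fill with a single comprehension computing each cell from the closed-form triangular offset i*(2N-i+1)//2.
import Mathlib
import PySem

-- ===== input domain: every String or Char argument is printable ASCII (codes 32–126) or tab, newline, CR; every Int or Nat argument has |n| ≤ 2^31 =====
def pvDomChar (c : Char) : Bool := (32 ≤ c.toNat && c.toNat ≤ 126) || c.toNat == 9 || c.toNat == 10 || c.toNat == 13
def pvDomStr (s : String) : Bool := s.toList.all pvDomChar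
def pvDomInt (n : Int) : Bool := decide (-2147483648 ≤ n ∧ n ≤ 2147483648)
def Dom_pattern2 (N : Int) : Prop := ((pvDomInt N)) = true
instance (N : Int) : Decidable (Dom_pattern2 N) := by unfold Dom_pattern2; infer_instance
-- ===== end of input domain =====

-- B replaces A's zero-init pass and sequential counter fill by a single closed-form comprehension (simpler).


-- ===== PORT A =====
-- literal transliteration: zero-init pass (append [] then append N zeros to ret[i]),
-- then the counter fill loop threading (ret, h).  Range indices are nonnegative, so
-- `.toNat` on them is exact.
def pattern2 (N : Int) : List (List Int) :=
  let ret : List (List Int) :=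
    (PySem.List.pyRange 0 N 1).foldl
      (fun ret i =>
        (PySem.List.pyRange 0 N 1).foldl
          (fun ret _j => ret.modify i.toNat (fun row => row ++ [(0 : Int)]))
          (ret ++ [[]]))
      []
  let s : List (List Int) × Int :=
    (PySem.List.pyRange 0 N 1).foldl
      (fun s i =>
        (PySem.List.pyRange 0 N 1).foldl
          (fun s j =>
            if j < N - i then (s.1.modify j.toNat (fun row => row.set i.toNat s.2), s.2 + 1)
            else s)
          s)
      (ret, 1)
  s.1

-- ===== PORT B =====
def pattern2_alt (N : Int) : List (List Int) :=
  (PySem.List.pyRange 0 N 1).map (fun j =>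
    (PySem.List.pyRange 0 N 1).map (fun i =>
      if j < N - i then PySem.Int.floordiv (i * (2 * N - i + 1)) 2 + j + 1 else 0))

-- ===== PRECONDITION & SPEC =====
def Spec_pattern2 (N : Int) (out : List (List Int)) : Prop := out = pattern2_alt N
instance (N : Int) (out : List (List Int)) : Decidable (Spec_pattern2 N out) := by unfold Spec_pattern2; infer_instance

-- ===== CLAIM (what is proved, stated in full; the proofs are below) =====
def Claim_equal_pattern2 : Prop := ∀ (N : Int), Dom_pattern2 N → Spec_pattern2 N (pattern2 N)

-- ===== LEMMAS AND PROOFS =====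

-- triangular offset, the value h has when the fill loop reaches column k
def Soff (N k : Int) : Int := (k * (2 * N - k + 1)) / 2

theorem Soff_floordiv (N k : Int) : PySem.Int.floordiv (k * (2 * N - k + 1)) 2 = Soff N k := by
  rw [PySem.Int.floordiv_eq_ediv_of_pos (by norm_num)]; rfl

theorem Soff_zero (N : Int) : Soff N 0 = 0 := by simp [Soff]

theorem Soff_succ (N k : Int) : Soff N (k + 1) = Soff N k + (N - k) := by
  unfold Soff
  have : (k + 1) * (2 * N - (k + 1) + 1) = k * (2 * N - k + 1) + (N - k) * 2 := by ring
  rw [this, Int.add_mul_ediv_right _ _ (by norm_num)]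

-- (M ++ [r]).modify at the last position
theorem modify_concat (M : List (List Int)) (r : List Int) (f : List Int → List Int) :
    (M ++ [r]).modify M.length f = M ++ [f r] := by
  induction M with
  | nil => rfl
  | cons a t ih => simpa [List.modify] using ih

-- inner zero-fill loop appends cnt zeros to the freshly appended last row
theorem zfill (k : Nat) : ∀ (cnt : Nat) (a b : Int) (M : List (List Int)) (r : List Int),
    M.length = k → a + cnt = b →
    (PySem.List.pyRange a b 1).foldl (fun ret _ => ret.modify k (fun row => row ++ [(0 : Int)])) (M ++ [r])
      = M ++ [r ++ List.replicate cnt (0 : Int)] := by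
  intro cnt
  induction cnt with
  | zero => intro a b M r hM hab
            rw [PySem.List.pyRange_one_eq_nil (by omega)]; simp
  | succ n ih =>
    intro a b M r hM hab
    rw [PySem.List.pyRange_one_cons (by omega)]
    simp only [List.foldl_cons]
    rw [← hM, modify_concat, hM, ih (a + 1) b M (r ++ [0]) hM (by omega)]
    simp [List.replicate_succ]

-- outer zero-init loop builds the remaining rows
theorem init_outer (N : Int) : ∀ (cnt : Nat) (a : Int) (M : List (List Int)),
    0 ≤ a → a + cnt = N → M.length = a.toNat →
    (PySem.List.pyRange a N 1).foldl
      (fun ret i =>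
        (PySem.List.pyRange 0 N 1).foldl
          (fun ret _j => ret.modify i.toNat (fun row => row ++ [(0 : Int)]))
          (ret ++ [[]]))
      M
      = M ++ List.replicate cnt (List.replicate N.toNat (0 : Int)) := by
  intro cnt
  induction cnt with
  | zero => intro a M ha hab hM
            rw [show PySem.List.pyRange a N 1 = [] from PySem.List.pyRange_one_eq_nil (by omega)]; simp
  | succ n ih =>
    intro a M ha hab hM
    rw [show PySem.List.pyRange a N 1 = a :: PySem.List.pyRange (a + 1) N 1 from
      PySem.List.pyRange_one_cons (by omega)]
    simp only [List.foldl_cons]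
    rw [zfill a.toNat N.toNat 0 N M [] hM (by omega)]
    rw [ih (a + 1) _ (by omega) (by omega) (by simp [hM]; omega)]
    simp [List.replicate_succ]

-- the inner fill loop, pointwise: column i gets h, h+1, … in rows j0 ≤ j < N - i
theorem fill_inner (N i : Int) (hi0 : 0 ≤ i) (_hiN : i < N) :
    ∀ (cnt : Nat) (j0 : Int) (M : List (List Int)) (h : Int) (g : Nat → Nat → Int),
    0 ≤ j0 → j0 + cnt = N → M.length = N.toNat →
    (∀ j : Nat, j < N.toNat → ∃ row, M[j]? = some row ∧ row.length = N.toNat ∧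
        ∀ k : Nat, k < N.toNat → row[k]? = some (g j k)) →
    ∀ r : List (List Int) × Int,
    r = (PySem.List.pyRange j0 N 1).foldl
        (fun (s : List (List Int) × Int) j =>
          if j < N - i then (s.1.modify j.toNat (fun row => row.set i.toNat s.2), s.2 + 1)
          else s) (M, h) →
    r.2 = h + max 0 (N - i - j0) ∧ r.1.length = N.toNat ∧
    ∀ j : Nat, j < N.toNat → ∃ row, r.1[j]? = some row ∧ row.length = N.toNat ∧
        ∀ k : Nat, k < N.toNat → row[k]? = some
          (if (k : Int) = i ∧ j0 ≤ (j : Int) ∧ (j : Int) < N - i then h + ((j : Int) - j0) else g j k) := by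
  intro cnt
  induction cnt with
  | zero =>
    intro j0 M h g hj0 hab hM hrows r hr
    rw [show PySem.List.pyRange j0 N 1 = [] from PySem.List.pyRange_one_eq_nil (by omega)] at hr
    subst hr
    refine ⟨by simp; omega, hM, fun j hj => ?_⟩
    obtain ⟨row, h1, h2, h3⟩ := hrows j hj
    refine ⟨row, h1, h2, fun k hk => ?_⟩
    rw [h3 k hk]
    congr 1
    rw [if_neg (by omega)]
  | succ n ih =>
    intro j0 M h g hj0 hab hM hrows r hr
    rw [show PySem.List.pyRange j0 N 1 = j0 :: PySem.List.pyRange (j0 + 1) N 1 from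
      PySem.List.pyRange_one_cons (by omega)] at hr
    simp only [List.foldl_cons] at hr
    by_cases hcase : j0 < N - i
    · rw [if_pos hcase] at hr
      have hstep := ih (j0 + 1) (M.modify j0.toNat (fun row => row.set i.toNat h)) (h + 1)
        (fun j k => if (j : Int) = j0 ∧ (k : Int) = i then h else g j k)
        (by omega) (by omega) (by simp [hM])
        (by
          intro j hj
          obtain ⟨row, h1, h2, h3⟩ := hrows j hj
          by_cases hjj : j0.toNat = j
          · refine ⟨row.set i.toNat h, ?_, by simp [h2], fun k hk => ?_⟩
            · rw [List.getElem?_modify, h1]; simp [hjj]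
            · dsimp only
              rw [List.getElem?_set]
              by_cases hki : i.toNat = k
              · rw [if_pos hki, if_pos (by omega), if_pos (by omega)]
              · rw [if_neg hki, h3 k hk]
                congr 1
                rw [if_neg (by omega)]
          · refine ⟨row, ?_, h2, fun k hk => ?_⟩
            · rw [List.getElem?_modify, h1]; simp [hjj]
            · dsimp only
              rw [h3 k hk]
              congr 1
              rw [if_neg (by omega)])
        r hr
      obtain ⟨hr2, hr1, hre⟩ := hstep
      refine ⟨by omega, hr1, fun j hj => ?_⟩
      obtain ⟨row, h1, h2, h3⟩ := hre j hj
      refine ⟨row, h1, h2, fun k hk => ?_⟩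
      rw [h3 k hk]
      congr 1
      dsimp only
      split_ifs <;> first | rfl | omega
    · rw [if_neg hcase] at hr
      obtain ⟨hr2, hr1, hre⟩ := ih (j0 + 1) M h g (by omega) (by omega) hM hrows r hr
      refine ⟨by omega, hr1, fun j hj => ?_⟩
      obtain ⟨row, h1, h2, h3⟩ := hre j hj
      refine ⟨row, h1, h2, fun k hk => ?_⟩
      rw [h3 k hk]
      congr 1
      split_ifs <;> first | rfl | omega

-- the outer fill loop, pointwise: columns i0 ≤ k < N get values starting at h + Soff N k - Soff N i0
theorem fill_outer (N : Int) :
    ∀ (cnt : Nat) (i0 : Int) (M : List (List Int)) (h : Int) (g : Nat → Nat → Int),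
    0 ≤ i0 → i0 + cnt = N → M.length = N.toNat →
    (∀ j : Nat, j < N.toNat → ∃ row, M[j]? = some row ∧ row.length = N.toNat ∧
        ∀ k : Nat, k < N.toNat → row[k]? = some (g j k)) →
    ∀ r : List (List Int) × Int,
    r = (PySem.List.pyRange i0 N 1).foldl
        (fun (s : List (List Int) × Int) i =>
          (PySem.List.pyRange 0 N 1).foldl
            (fun (s : List (List Int) × Int) j =>
              if j < N - i then (s.1.modify j.toNat (fun row => row.set i.toNat s.2), s.2 + 1)
              else s) s) (M, h) →
    r.1.length = N.toNat ∧
    ∀ j : Nat, j < N.toNat → ∃ row, r.1[j]? = some row ∧ row.length = N.toNat ∧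
        ∀ k : Nat, k < N.toNat → row[k]? = some
          (if i0 ≤ (k : Int) ∧ (j : Int) < N - k then h + (Soff N k - Soff N i0) + (j : Int) else g j k) := by
  intro cnt
  induction cnt with
  | zero =>
    intro i0 M h g hi0 hab hM hrows r hr
    rw [show PySem.List.pyRange i0 N 1 = [] from PySem.List.pyRange_one_eq_nil (by omega)] at hr
    subst hr
    refine ⟨hM, fun j hj => ?_⟩
    obtain ⟨row, h1, h2, h3⟩ := hrows j hj
    refine ⟨row, h1, h2, fun k hk => ?_⟩
    rw [h3 k hk]
    congr 1
    rw [if_neg (by omega)]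
  | succ n ih =>
    intro i0 M h g hi0 hab hM hrows r hr
    rw [show PySem.List.pyRange i0 N 1 = i0 :: PySem.List.pyRange (i0 + 1) N 1 from
      PySem.List.pyRange_one_cons (by omega)] at hr
    simp only [List.foldl_cons] at hr
    obtain ⟨hi2, hi1, hie⟩ := fill_inner N i0 hi0 (by omega) N.toNat 0 M h g (by omega) (by omega) hM hrows
      ((PySem.List.pyRange 0 N 1).foldl
        (fun (s : List (List Int) × Int) j =>
          if j < N - i0 then (s.1.modify j.toNat (fun row => row.set i0.toNat s.2), s.2 + 1)
          else s) (M, h)) rfl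
    obtain ⟨hr1, hre⟩ := ih (i0 + 1) _ _
      (fun j k => if (k : Int) = i0 ∧ 0 ≤ (j : Int) ∧ (j : Int) < N - i0 then h + ((j : Int) - 0) else g j k)
      (by omega) (by omega) hi1 hie r hr
    refine ⟨hr1, fun j hj => ?_⟩
    obtain ⟨row, h1, h2, h3⟩ := hre j hj
    refine ⟨row, h1, h2, fun k hk => ?_⟩
    rw [h3 k hk, hi2]
    congr 1
    dsimp only
    have hmax : max 0 (N - i0 - 0) = N - i0 := by omega
    rw [hmax]
    by_cases hki : (k : Int) = i0
    · rw [hki]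
      split_ifs <;> first | rfl | omega
    · have hs := Soff_succ N i0
      generalize Soff N (k : Int) = A at *
      generalize Soff N i0 = B at *
      rw [hs]
      split_ifs <;> first | rfl | omega

-- ===== VERDICT (by name: the statement is the Claim_ definition above) =====
theorem pattern2_spec : Claim_equal_pattern2 := by
  unfold Claim_equal_pattern2
  intro N _
  unfold Spec_pattern2
  by_cases hN : N ≤ 0
  · unfold pattern2 pattern2_alt
    rw [show PySem.List.pyRange 0 N 1 = [] from PySem.List.pyRange_one_eq_nil (by omega)]
    rfl
  · rw [not_le] at hN
    have hinit := init_outer N N.toNat 0 [] le_rfl (by omega) (by simp)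
    simp only [List.nil_append] at hinit
    obtain ⟨hr1, hre⟩ := fill_outer N N.toNat 0
      (List.replicate N.toNat (List.replicate N.toNat (0 : Int))) 1 (fun _ _ => 0)
      le_rfl (by omega) (by simp)
      (by
        intro j hj
        refine ⟨List.replicate N.toNat (0 : Int), ?_, by simp, fun k hk => ?_⟩
        · rw [List.getElem?_replicate, if_pos hj]
        · rw [List.getElem?_replicate, if_pos hk])
      _ rfl
    simp only [pattern2, pattern2_alt]
    rw [hinit]
    refine List.ext_getElem? fun j => ?_
    by_cases hj : j < N.toNat
    · obtain ⟨row, h1, h2, h3⟩ := hre j hj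
      rw [h1, List.getElem?_map, PySem.List.getElem?_pyRange_one, if_pos (by omega)]
      simp only [Option.map_some, zero_add]
      congr 1
      refine List.ext_getElem? fun k => ?_
      by_cases hk : k < N.toNat
      · rw [List.getElem?_map, PySem.List.getElem?_pyRange_one,
          if_pos (show k < (N - 0).toNat by omega)]
        simp only [Option.map_some, zero_add]
        rw [h3 k hk]
        rw [Soff_floordiv, Soff_zero]
        congr 1
        generalize Soff N (k : Int) = A
        split_ifs <;> first | rfl | omega
      · rw [List.getElem?_eq_none, List.getElem?_eq_none]
        · simp only [List.length_map, PySem.List.length_pyRange_one]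
          omega
        · omega
    · rw [List.getElem?_eq_none, List.getElem?_eq_none]
      · simp only [List.length_map, PySem.List.length_pyRange_one]
        omega
      · omega
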